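-- pv_equiv track=rewrite | github.com/russ-hensel/stuffdb | libs/string_utils.py | clean_string_to_list
-- ===== SOURCE A (Python) =====
-- def clean_string_to_list( a_string,
--                          delete_tailing_spaces  = True,
--                          delete_comments        = False,
--                          delete_blank_lines     = False,  ):
--     """
--     break a string on \n and put in list
--         clean
--            delete_tailing_spaces  = True,
--            delete_comments        = False,   here comment need to start on col 0
--            delete_blank_lines     = False,
--     see also the textwrap
--     """
--     a_list   = a_string.split( "\n" )
--
--     if delete_comments:
--         a_list   = [ i_line for i_line in a_list if not i_line.startswith( "#") ]
--
--     if delete_blank_lines: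
--         a_list   = [ i_line for i_line in a_list if i_line.strip( ) != ""]
--
--     if delete_tailing_spaces:
--         # for i_line in a_list:
--         #     i_line = i_line.r_strip()
--         a_list   = [ i_line.rstrip() for i_line in a_list ]
--
--
--
--     return a_list
-- ===== SOURCE B (Python) =====
-- def clean_string_to_list(a_string,
--                          delete_tailing_spaces=True,
--                          delete_comments=False,
--                          delete_blank_lines=False):
--     # Character-level scanner: no split()/startswith()/strip()/rstrip().
--     # cur holds the current line's characters; keep is the index just past
--     # the last non-whitespace character (high-water mark), so cur[:keep] is
--     # the line with trailing whitespace removed and keep == 0 means blank.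
--     result = []
--     cur = []
--     keep = 0
--     for ch in a_string + "\n":
--         if ch == "\n":
--             if not ((delete_comments and cur[:1] == ["#"]) or
--                     (delete_blank_lines and keep == 0)):
--                 result.append("".join(cur[:keep] if delete_tailing_spaces else cur))
--             cur = []
--             keep = 0
--         else:
--             cur.append(ch)
--             if not ch.isspace():
--                 keep = len(cur)
--     return result
-- ===== Notes on version B (the rewrite author's own statement) =====
-- stated objective: alternative
-- what changed: A splits the string and then runs up to three staged filter/map passes using startswith/strip/rstrip; B is a single character-level scanner that never calls split/startswith/strip/rstrip: it assembles each line itself and maintains a high-water mark (index past the last non-whitespace char), from which blank detection and trailing-space trimming fall out directly.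
import Mathlib
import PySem

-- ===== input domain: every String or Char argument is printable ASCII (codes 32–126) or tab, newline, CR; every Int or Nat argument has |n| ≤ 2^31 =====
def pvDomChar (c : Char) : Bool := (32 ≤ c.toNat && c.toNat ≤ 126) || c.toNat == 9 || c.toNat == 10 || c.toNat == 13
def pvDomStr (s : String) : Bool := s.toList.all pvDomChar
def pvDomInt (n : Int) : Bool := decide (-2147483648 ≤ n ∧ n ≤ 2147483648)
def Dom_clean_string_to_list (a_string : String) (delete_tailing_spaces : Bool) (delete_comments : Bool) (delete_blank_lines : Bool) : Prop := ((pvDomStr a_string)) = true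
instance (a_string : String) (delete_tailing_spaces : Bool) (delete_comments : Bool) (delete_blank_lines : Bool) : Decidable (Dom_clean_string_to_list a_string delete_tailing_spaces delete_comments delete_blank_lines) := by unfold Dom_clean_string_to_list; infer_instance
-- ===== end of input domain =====

-- B replaces A's split-then-filter/filter/map pipeline by a single character-level
-- scan that builds each line itself and keeps a high-water mark of the last
-- non-whitespace character, so no split/startswith/strip/rstrip calls are made
-- (objective: alternative algorithm, same asymptotic cost).

-- ===== PORT A =====
def clean_string_to_list (a_string : String) (delete_tailing_spaces : Bool) (delete_comments : Bool) (delete_blank_lines : Bool) : List String :=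
  let a_list := (PySem.Str.split? a_string "\n").getD []
  let a_list := if delete_comments then a_list.filter (fun i_line => !(PySem.Str.startswith i_line "#")) else a_list
  let a_list := if delete_blank_lines then a_list.filter (fun i_line => !(PySem.Str.strip i_line == "")) else a_list
  let a_list := if delete_tailing_spaces then a_list.map (fun i_line => PySem.Str.rstrip i_line) else a_list
  a_list

-- ===== PORT B =====
-- the loop of Source B: cs = remaining characters of a_string + "\n", cur = current
-- line so far, keep = index just past the last non-whitespace char of cur
def clean_scan (dts dc db : Bool) : List Char → List Char → Nat → List String
  | [], _, _ => []
  | c :: rest, cur, keep =>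
    if c = '\n' then
      if !((dc && (cur.take 1 == ['#'])) || (db && (keep == 0))) then
        String.ofList (if dts then cur.take keep else cur) :: clean_scan dts dc db rest [] 0
      else
        clean_scan dts dc db rest [] 0
    else
      clean_scan dts dc db rest (cur ++ [c])
        (if !(PySem.Chars.isspace c) then (cur ++ [c]).length else keep)

def clean_string_to_list_alt (a_string : String) (delete_tailing_spaces : Bool) (delete_comments : Bool) (delete_blank_lines : Bool) : List String :=
  clean_scan delete_tailing_spaces delete_comments delete_blank_lines
    (a_string.toList ++ ['\n']) [] 0

-- ===== PRECONDITION & SPEC =====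
def Spec_clean_string_to_list (a_string : String) (delete_tailing_spaces : Bool) (delete_comments : Bool) (delete_blank_lines : Bool) (out : List String) : Prop := out = clean_string_to_list_alt a_string delete_tailing_spaces delete_comments delete_blank_lines
instance (a_string : String) (delete_tailing_spaces : Bool) (delete_comments : Bool) (delete_blank_lines : Bool) (out : List String) : Decidable (Spec_clean_string_to_list a_string delete_tailing_spaces delete_comments delete_blank_lines out) := by unfold Spec_clean_string_to_list; infer_instance

-- ===== CLAIM (what is proved, stated in full; the proofs are below) =====
def Claim_equal_clean_string_to_list : Prop := ∀ (a_string : String) (delete_tailing_spaces : Bool) (delete_comments : Bool) (delete_blank_lines : Bool), Dom_clean_string_to_list a_string delete_tailing_spaces delete_comments delete_blank_lines → Spec_clean_string_to_list a_string delete_tailing_spaces delete_comments delete_blank_lines (clean_string_to_list a_string delete_tailing_spaces delete_comments delete_blank_lines)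

-- ===== LEMMAS AND PROOFS =====

-- reference splitter: the lines of `l` (current partial line `cur`), '\n'-separated
def pvLines : List Char → List Char → List (List Char)
  | [], cur => [cur]
  | c :: rest, cur => if c = '\n' then cur :: pvLines rest [] else pvLines rest (cur ++ [c])

-- reference per-line processing, with B's forms of the three tests
def pvProc (dts dc db : Bool) : List (List Char) → List String
  | [] => []
  | l :: rest =>
    if !((dc && (l.take 1 == ['#'])) || (db && ((PySem.Chars.rstrip l).length == 0))) then
      String.ofList (if dts then PySem.Chars.rstrip l else l) :: pvProc dts dc db rest
    else
      pvProc dts dc db rest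

theorem go_eq_pvLines (l : List Char) : ∀ (fuel : Nat) (cur : List Char) (acc : List (List Char)),
    l.length ≤ fuel →
    PySem.Chars.splitOn.go ['\n'] fuel l cur acc = acc.reverse ++ pvLines l cur.reverse := by
  induction l with
  | nil =>
    intro fuel cur acc _
    cases fuel with
    | zero => rw [PySem.Chars.splitOn.go]; simp [pvLines]
    | succ f =>
      rw [PySem.Chars.splitOn.go]
      all_goals simp [pvLines]
  | cons c rest ih =>
    intro fuel cur acc hf
    cases fuel with
    | zero => simp at hf
    | succ f =>
      rw [PySem.Chars.splitOn.go]
      by_cases hc : c = '\n'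
      · subst hc
        have hpre : ['\n'].isPrefixOf ('\n' :: rest) = true := by simp [List.isPrefixOf]
        have hdrop : List.drop (['\n'] : List Char).length ('\n' :: rest) = rest := rfl
        simp only [hpre, if_pos, hdrop]
        rw [ih f [] (cur.reverse :: acc) (by simp at hf ⊢; omega)]
        simp [pvLines]
      · have hpre : ['\n'].isPrefixOf (c :: rest) = false := by
          simp [List.isPrefixOf]; exact fun h => absurd h.symm hc
        simp only [hpre, Bool.false_eq_true, if_false]
        rw [ih f (c :: cur) acc (by simp at hf ⊢; omega)]
        simp [pvLines, hc]

theorem splitOn_eq_pvLines (l : List Char) :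
    PySem.Chars.splitOn l ['\n'] = pvLines l [] := by
  have := go_eq_pvLines l (l.length + 1) [] [] (by omega)
  simpa [PySem.Chars.splitOn] using this

theorem rstrip_append (cur : List Char) (c : Char) :
    PySem.Chars.rstrip (cur ++ [c]) = if PySem.Chars.isspace c then PySem.Chars.rstrip cur else cur ++ [c] := by
  simp [PySem.Chars.rstrip, List.dropWhile]
  split_ifs with h <;> simp [h]

theorem rstrip_prefix (cur : List Char) : PySem.Chars.rstrip cur <+: cur := by
  simpa [PySem.Chars.rstrip] using (List.dropWhile_suffix (l := cur.reverse) (p := PySem.Chars.isspace)).reverse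

theorem take_rstrip (cur : List Char) : cur.take (PySem.Chars.rstrip cur).length = PySem.Chars.rstrip cur :=
  ((List.prefix_iff_eq_take).mp (rstrip_prefix cur)).symm

theorem rstrip_eq_nil_iff (l : List Char) :
    PySem.Chars.rstrip l = [] ↔ ∀ c ∈ l, PySem.Chars.isspace c = true := by
  simp [PySem.Chars.rstrip, List.dropWhile_eq_nil_iff]

theorem strip_eq_nil_iff (l : List Char) :
    PySem.Chars.strip l = [] ↔ ∀ c ∈ l, PySem.Chars.isspace c = true := by
  rw [PySem.Chars.strip, rstrip_eq_nil_iff]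
  constructor
  · intro h c hc
    rw [← List.takeWhile_append_dropWhile (p := PySem.Chars.isspace) (l := l)] at hc
    rcases List.mem_append.mp hc with h1 | h2
    · exact List.mem_takeWhile_imp h1
    · exact h c h2
  · intro h c hc
    exact h c ((List.dropWhile_sublist _).subset hc)

theorem startswith_hash (l : List Char) :
    PySem.Chars.startswith l ['#'] = (l.take 1 == ['#']) := by
  cases l with
  | nil => simp [PySem.Chars.startswith, List.isPrefixOf]
  | cons c t => simp [PySem.Chars.startswith, List.isPrefixOf, eq_comm]

theorem ofList_eq_empty_iff (l : List Char) : String.ofList l = "" ↔ l = [] := by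
  constructor
  · intro h
    simpa using congrArg String.toList h
  · intro h; subst h; rfl

theorem scan_eq_proc (dts dc db : Bool) (l : List Char) : ∀ (cur : List Char) (keep : Nat),
    keep = (PySem.Chars.rstrip cur).length →
    clean_scan dts dc db (l ++ ['\n']) cur keep = pvProc dts dc db (pvLines l cur) := by
  induction l with
  | nil =>
    intro cur keep hk
    simp [clean_scan, pvLines, pvProc, hk, take_rstrip]
  | cons c rest ih =>
    intro cur keep hk
    by_cases hc : c = '\n'
    · subst hc
      simp only [List.cons_append, clean_scan, pvLines]
      rw [ih [] 0 (by simp [PySem.Chars.rstrip])]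
      simp [hk, take_rstrip, pvProc, List.length_eq_zero_iff]
    · simp only [List.cons_append, clean_scan, pvLines, if_neg hc]
      apply ih
      rw [rstrip_append]
      by_cases hs : PySem.Chars.isspace c <;> simp [hs, hk]

theorem pipeline_eq_proc (dts dc db : Bool) (lines : List (List Char)) :
    (let a1 := lines.map String.ofList
     let a2 := if dc then a1.filter (fun s => !(PySem.Str.startswith s "#")) else a1
     let a3 := if db then a2.filter (fun s => !(PySem.Str.strip s == "")) else a2
     if dts then a3.map (fun s => PySem.Str.rstrip s) else a3) = pvProc dts dc db lines := by
  induction lines with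
  | nil => cases dc <;> cases db <;> cases dts <;> simp [pvProc]
  | cons l rest ih =>
    have hsw : PySem.Str.startswith (String.ofList l) "#" = (l.take 1 == ['#']) := by
      have hh : ("#" : String).toList = ['#'] := rfl
      simp [PySem.Str.startswith, hh, startswith_hash]
    have hst : (PySem.Str.strip (String.ofList l) == "") = ((PySem.Chars.rstrip l).length == 0) := by
      rw [PySem.Str.strip]
      simp only [String.toList_ofList]
      by_cases hall : ∀ c ∈ l, PySem.Chars.isspace c = true
      · have h1 : PySem.Chars.strip l = [] := (strip_eq_nil_iff l).mpr hall
        have h2 : PySem.Chars.rstrip l = [] := (rstrip_eq_nil_iff l).mpr hall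
        simp [h1, h2]
      · have h1 : PySem.Chars.strip l ≠ [] := fun h => hall ((strip_eq_nil_iff l).mp h)
        have h2 : PySem.Chars.rstrip l ≠ [] := fun h => hall ((rstrip_eq_nil_iff l).mp h)
        have h3 : String.ofList (PySem.Chars.strip l) ≠ "" := fun h => h1 ((ofList_eq_empty_iff _).mp h)
        simp [h3, List.length_eq_zero_iff, h2]
    have hrs : PySem.Str.rstrip (String.ofList l) = String.ofList (PySem.Chars.rstrip l) := by
      simp [PySem.Str.rstrip]
    simp only [List.map_cons] at ih ⊢
    cases dc <;> cases db <;> cases dts <;>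
      simp only [ite_true, List.filter_cons, pvProc,
        Bool.false_and, Bool.true_and, Bool.false_or, Bool.or_false, hsw] at ih ⊢ <;>
      by_cases h1 : (l.take 1 == ['#']) = true <;>
      by_cases h2 : ((PySem.Chars.rstrip l).length == 0) = true <;>
      simp_all [pvProc, hst, hrs]

-- ===== VERDICT (by name: the statement is the Claim_ definition above) =====
theorem clean_string_to_list_spec : Claim_equal_clean_string_to_list := by
  intro s dts dc db _
  unfold Spec_clean_string_to_list clean_string_to_list clean_string_to_list_alt
  have hsplit : (PySem.Str.split? s "\n").getD [] = (pvLines s.toList []).map String.ofList := by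
    have hnl : ("\n" : String).toList = ['\n'] := rfl
    simp [PySem.Str.split?, PySem.Chars.split?, hnl, splitOn_eq_pvLines]
  rw [hsplit, scan_eq_proc dts dc db s.toList [] 0 (by simp [PySem.Chars.rstrip])]
  exact pipeline_eq_proc dts dc db (pvLines s.toList [])
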